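-- pv_equiv track=rewrite | github.com/githeim/wh_tmpl | wh_tmpl.py | Find_Prj_Ctx
-- ===== SOURCE A (Python) =====
-- def Chk_Duplicated_Prj(prj_list):
--   ret = False
--   log = "Duplicated Projects \n"
--   prj_dictionary = { }
--   for [ProjectName,Desc,Path,ref_prj] in prj_list:
--     if ProjectName in prj_dictionary:
--         prj_dictionary[ProjectName].append([Desc,Path])
--     else :
--         prj_dictionary[ProjectName] = [  [Desc,Path] ]
--
--   for item in prj_dictionary:
--     duplications = len(prj_dictionary[item])
--     if duplications > 1 :
--       ret = True
--       log+= "\nThe Project [%s] is duplicated : There are %d duplications\n" \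
--               % ( item, duplications )
--       for [desc, path] in prj_dictionary[item]  :
--         log+= "Description  ; [%s]\nProject Path ; [%s]\n" \
--                 % (desc,path)
--   if ret == False :
--     log =""
--   return (ret,log)
--
-- def Find_Prj_Ctx(target_prj_name,prj_list):
--   prj_ctx = None
--   (Duplret,Dupllog) = Chk_Duplicated_Prj(prj_list)
--   if Duplret == True :
--     return (False,None)
--
--   for [prj_name,prj_desc,prj_path,ref_prj] in prj_list:
--     if (target_prj_name == prj_name) :
--       prj_ctx = [prj_name,prj_desc,prj_path,ref_prj]
--
--   if (prj_ctx == None):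
--     # :x: the case of cannot find target project
--     return (False,[None,None,None,None])
--
--   return (True,prj_ctx)
-- ===== SOURCE B (Python) =====
-- def Find_Prj_Ctx(target_prj_name, prj_list):
--     # Single pass: seen-name set for duplicate detection, last matching row kept.
--     seen = set()
--     dup = False
--     match = None
--     for [prj_name, prj_desc, prj_path, ref_prj] in prj_list:
--         if prj_name in seen:
--             dup = True
--         seen.add(prj_name)
--         if target_prj_name == prj_name:
--             match = [prj_name, prj_desc, prj_path, ref_prj]
--     if dup:
--         return (False, None)
--     if match is None:
--         return (False, [None, None, None, None])
--     return (True, match)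
-- ===== Notes on version B (the rewrite author's own statement) =====
-- stated objective: simpler
-- what changed: A's two-phase design (build a dict of [desc,path] lists grouped by name plus a log string, then a second full scan for the target) is collapsed into one loop that tracks a seen-name set, a duplicate flag and the last matching row, with no dict, no grouping and no log building.
import Mathlib
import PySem

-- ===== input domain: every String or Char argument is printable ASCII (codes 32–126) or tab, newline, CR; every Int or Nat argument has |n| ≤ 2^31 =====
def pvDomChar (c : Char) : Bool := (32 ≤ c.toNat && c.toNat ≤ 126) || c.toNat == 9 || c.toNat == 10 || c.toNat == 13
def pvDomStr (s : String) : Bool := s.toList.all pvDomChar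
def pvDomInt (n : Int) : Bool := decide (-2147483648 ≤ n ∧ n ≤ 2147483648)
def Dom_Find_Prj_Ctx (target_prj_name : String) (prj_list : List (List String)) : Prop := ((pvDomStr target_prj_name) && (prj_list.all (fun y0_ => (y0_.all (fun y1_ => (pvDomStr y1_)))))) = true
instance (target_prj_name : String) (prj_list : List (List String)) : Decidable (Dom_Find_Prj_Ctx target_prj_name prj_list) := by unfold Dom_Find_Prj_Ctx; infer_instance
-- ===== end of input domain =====

-- B collapses A's dict-grouping duplicate pass + log building + separate target scan into one loop
-- over the rows with a seen-name set, a duplicate flag and the last matching row (objective: simpler).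


-- ===== PORT A =====
-- one iteration of A's first loop: group [Desc,Path] pairs by ProjectName in a dict
def pvChkStep (d : PySem.Dict String (List (List String))) (row : List String) : PySem.Dict String (List (List String)) :=
  match row with
  | [n, desc, path, _ref] =>
      match d.get? n with
      | some v => d.insert n (v ++ [[desc, path]])
      | none   => d.insert n [[desc, path]]
  | _ => d  -- Python raises ValueError here (row not of length 4); excluded by Pre_

-- the log text A appends for one duplicated project (inner 'for [desc, path] in …' loop)
def pvDupLogEntry (log : String) (item : String) (entries : List (List String)) : String :=
  let log := log ++ "\nThe Project [" ++ item ++ "] is duplicated : There are " ++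
             PySem.Int.toStr (Int.ofNat entries.length) ++ " duplications\n"
  entries.foldl (fun lg e =>
    match e with
    | [desc, path] => lg ++ "Description  ; [" ++ desc ++ "]\nProject Path ; [" ++ path ++ "]\n"
    | _ => lg) log

def Chk_Duplicated_Prj (prj_list : List (List String)) : Bool × String :=
  let d := prj_list.foldl pvChkStep PySem.Dict.empty
  let s := d.keys.foldl
    (fun (s : Bool × String) item =>
      if (d.getD item []).length > 1 then (true, pvDupLogEntry s.2 item (d.getD item []))
      else s)
    (false, "Duplicated Projects \n")
  if s.1 = false then (s.1, "") else s

def Find_Prj_Ctx (target_prj_name : String) (prj_list : List (List String)) : Bool × Option (List (Option String)) :=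
  let chk := Chk_Duplicated_Prj prj_list
  if chk.1 = true then (false, none)
  else
    let prj_ctx := prj_list.foldl
      (fun (m : Option (List (Option String))) row =>
        match row with
        | [n, de, pa, re] => if target_prj_name = n then some [some n, some de, some pa, some re] else m
        | _ => m)  -- Python raises ValueError here; excluded by Pre_
      none
    match prj_ctx with
    | none   => (false, some [none, none, none, none])
    | some c => (true, some c)

-- ===== PORT B =====
def Find_Prj_Ctx_alt (target_prj_name : String) (prj_list : List (List String)) : Bool × Option (List (Option String)) :=
  let st := prj_list.foldl
    (fun (s : PySem.Set String × Bool × Option (List (Option String))) row =>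
      match row with
      | [n, de, pa, re] =>
          let dup := if PySem.Set.contains s.1 n then true else s.2.1
          let seen := PySem.Set.add s.1 n
          let m := if target_prj_name = n then some [some n, some de, some pa, some re] else s.2.2
          (seen, dup, m)
      | _ => s)  -- Python raises ValueError here; excluded by Pre_
    (PySem.Set.empty, false, none)
  if st.2.1 then (false, none)
  else
    match st.2.2 with
    | none   => (false, some [none, none, none, none])
    | some c => (true, some c)

-- ===== PRECONDITION & SPEC =====
-- Pre_ excludes exactly the inputs where Python A raises ValueError: a row that does not unpack
-- into exactly four fields [prj_name, prj_desc, prj_path, ref_prj].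
def Pre_Find_Prj_Ctx (target_prj_name : String) (prj_list : List (List String)) : Prop :=
  ∀ row ∈ prj_list, row.length = 4
instance (target_prj_name : String) (prj_list : List (List String)) : Decidable (Pre_Find_Prj_Ctx target_prj_name prj_list) := by unfold Pre_Find_Prj_Ctx; infer_instance

def pvWitness_Find_Prj_Ctx : String × List (List String) :=
  ("p1", [["p1", "desc", "/p1", ""], ["p2", "d2", "/p2", "p1"]])

def Spec_Find_Prj_Ctx (target_prj_name : String) (prj_list : List (List String)) (out : Bool × Option (List (Option String))) : Prop := out = Find_Prj_Ctx_alt target_prj_name prj_list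
instance (target_prj_name : String) (prj_list : List (List String)) (out : Bool × Option (List (Option String))) : Decidable (Spec_Find_Prj_Ctx target_prj_name prj_list out) := by unfold Spec_Find_Prj_Ctx; infer_instance

-- ===== CLAIM (what is proved, stated in full; the proofs are below) =====
def Claim_equal_Find_Prj_Ctx : Prop := ∀ (target_prj_name : String) (prj_list : List (List String)), Dom_Find_Prj_Ctx target_prj_name prj_list → Pre_Find_Prj_Ctx target_prj_name prj_list → Spec_Find_Prj_Ctx target_prj_name prj_list (Find_Prj_Ctx target_prj_name prj_list)

-- ===== LEMMAS AND PROOFS =====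

-- the project name of a (length-4) row
def pvNm (row : List String) : String := row.headD ""

-- A's dict groups one [desc,path] entry per occurrence: value length at n = count of name n
theorem pvChk_getD_len (l : List (List String)) (h : ∀ row ∈ l, row.length = 4) :
    ∀ (d : PySem.Dict String (List (List String))) (n : String),
      ((l.foldl pvChkStep d).getD n []).length = (d.getD n []).length + (l.map pvNm).count n := by
  induction l with
  | nil => simp
  | cons row rest ih =>
    intro d n
    obtain ⟨a, b, c, r, rfl⟩ : ∃ a b c r, row = [a, b, c, r] := by
      have := h row (by simp)
      match row, this with
      | [a, b, c, r], _ => exact ⟨a, b, c, r, rfl⟩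
    have hrest : ∀ row ∈ rest, row.length = 4 := fun x hx => h x (by simp [hx])
    simp only [List.foldl_cons, ih hrest]
    have hred : pvChkStep d [a, b, c, r] =
        (match d.get? a with
         | some v => d.insert a (v ++ [[b, c]])
         | none   => d.insert a [[b, c]]) := rfl
    have hstep : ((pvChkStep d [a, b, c, r]).getD n []).length =
        (d.getD n []).length + (if n = a then 1 else 0) := by
      rw [hred]
      cases hg : d.get? a with
      | some v =>
        rw [PySem.Dict.getD_insert]
        split_ifs with he
        · subst he; rw [PySem.Dict.getD_eq_get?_getD, hg]; simp
        · simp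
      | none =>
        rw [PySem.Dict.getD_insert]
        split_ifs with he
        · subst he; rw [PySem.Dict.getD_eq_get?_getD, hg]; simp
        · simp
    rw [hstep]
    simp only [pvNm, List.map_cons, List.headD, List.count_cons]
    by_cases he : n = a
    · subst he; simp; omega
    · simp [he, Ne.symm he]

-- membership in the keys of A's dict = occurrence among the names
theorem pvChk_mem_keys (l : List (List String)) (h : ∀ row ∈ l, row.length = 4) :
    ∀ (d : PySem.Dict String (List (List String))) (n : String),
      n ∈ (l.foldl pvChkStep d).keys ↔ n ∈ d.keys ∨ n ∈ l.map pvNm := by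
  induction l with
  | nil => simp
  | cons row rest ih =>
    intro d n
    obtain ⟨a, b, c, r, rfl⟩ : ∃ a b c r, row = [a, b, c, r] := by
      have := h row (by simp)
      match row, this with
      | [x, y, z, w], _ => exact ⟨x, y, z, w, rfl⟩
    have hrest : ∀ row ∈ rest, row.length = 4 := fun x hx => h x (by simp [hx])
    simp only [List.foldl_cons, ih hrest]
    have hred : pvChkStep d [a, b, c, r] =
        (match d.get? a with
         | some v => d.insert a (v ++ [[b, c]])
         | none   => d.insert a [[b, c]]) := rfl
    have hstep : n ∈ (pvChkStep d [a, b, c, r]).keys ↔ n = a ∨ n ∈ d.keys := by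
      rw [hred]
      cases hg : d.get? a <;> simp [PySem.Dict.mem_keys_insert]
    rw [hstep]
    simp [pvNm]
    tauto

-- the first component of A's ret/log loop ignores the log: it is an 'any' over the keys
theorem pvRet_fst (d : PySem.Dict String (List (List String))) (ks : List String) :
    ∀ (b : Bool × String),
      (ks.foldl (fun (s : Bool × String) item =>
          if (d.getD item []).length > 1 then (true, pvDupLogEntry s.2 item (d.getD item []))
          else s) b).1
        = (b.1 || ks.any fun k => decide ((d.getD k []).length > 1)) := by
  induction ks with
  | nil => simp
  | cons k rest ih =>
    intro b
    simp only [List.foldl_cons, List.any_cons]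
    split_ifs with hk
    · rw [ih]; simp [hk]
    · rw [ih]; simp [hk]

-- B's loop: the match accumulator evolves independently of the seen set and the flag
theorem pvB_match (t : String) (l : List (List String)) :
    ∀ (s : PySem.Set String × Bool × Option (List (Option String))),
      (l.foldl (fun (s : PySem.Set String × Bool × Option (List (Option String))) row =>
        match row with
        | [n, de, pa, re] =>
            let dup := if PySem.Set.contains s.1 n then true else s.2.1
            let seen := PySem.Set.add s.1 n
            let m := if t = n then some [some n, some de, some pa, some re] else s.2.2
            (seen, dup, m)
        | _ => s) s).2.2
      = l.foldl (fun (m : Option (List (Option String))) row =>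
          match row with
          | [n, de, pa, re] => if t = n then some [some n, some de, some pa, some re] else m
          | _ => m) s.2.2 := by
  induction l with
  | nil => intro s; rfl
  | cons row rest ih =>
    intro s
    match row with
    | [] => exact ih s
    | [_] => exact ih s
    | [_, _] => exact ih s
    | [_, _, _] => exact ih s
    | n :: de :: pa :: re :: _ :: _ => exact ih s
    | [n, de, pa, re] => simp only [List.foldl_cons]; rw [ih]

-- B's loop: the duplicate flag is true iff an old name is hit or the names repeat
theorem pvB_dup (t : String) (l : List (List String)) (h : ∀ row ∈ l, row.length = 4) :
    ∀ (s : PySem.Set String × Bool × Option (List (Option String))),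
      ((l.foldl (fun (s : PySem.Set String × Bool × Option (List (Option String))) row =>
        match row with
        | [n, de, pa, re] =>
            let dup := if PySem.Set.contains s.1 n then true else s.2.1
            let seen := PySem.Set.add s.1 n
            let m := if t = n then some [some n, some de, some pa, some re] else s.2.2
            (seen, dup, m)
        | _ => s) s).2.1 = true
       ↔ s.2.1 = true ∨ (∃ x ∈ l.map pvNm, x ∈ s.1) ∨ ¬ (l.map pvNm).Nodup) := by
  induction l with
  | nil => intro s; simp
  | cons row rest ih =>
    intro s
    obtain ⟨a, b, c, r, rfl⟩ : ∃ a b c r, row = [a, b, c, r] := by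
      have := h row (by simp)
      match row, this with
      | [x, y, z, w], _ => exact ⟨x, y, z, w, rfl⟩
    have hrest : ∀ row ∈ rest, row.length = 4 := fun x hx => h x (by simp [hx])
    simp only [List.foldl_cons]
    rw [ih hrest]
    by_cases hc : a ∈ s.1
    · have hcb : PySem.Set.contains s.1 a = true := (PySem.Set.contains_iff s.1 a).mpr hc
      simp only [hcb, if_true, pvNm, List.map_cons, List.headD, List.mem_cons, true_or]
      constructor
      · intro _; exact Or.inr (Or.inl ⟨a, Or.inl rfl, hc⟩)
      · intro _; trivial
    · have hcb : PySem.Set.contains s.1 a = false := by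
        rcases Bool.eq_false_or_eq_true (PySem.Set.contains s.1 a) with hb | hb
        · exact absurd ((PySem.Set.contains_iff s.1 a).mp hb) hc
        · exact hb
      simp only [hcb, pvNm, List.map_cons, List.headD, List.mem_cons,
        List.nodup_cons, PySem.Set.mem_add]
      constructor
      · rintro (hd | ⟨x, hx, hxs | rfl⟩ | hnd)
        · exact Or.inl hd
        · exact Or.inr (Or.inl ⟨x, Or.inr hx, hxs⟩)
        · exact Or.inr (Or.inr (fun hand => hand.1 hx))
        · exact Or.inr (Or.inr (fun hand => hnd hand.2))
      · rintro (hd | ⟨x, rfl | hx, hxs⟩ | hnd)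
        · exact Or.inl hd
        · exact absurd hxs hc
        · exact Or.inr (Or.inl ⟨x, hx, Or.inl hxs⟩)
        · by_cases hna : a ∈ rest.map pvNm
          · exact Or.inr (Or.inl ⟨a, hna, Or.inr rfl⟩)
          · exact Or.inr (Or.inr (fun hnd' => hnd ⟨hna, hnd'⟩))

-- A's duplicate verdict = "the names are not Nodup"
theorem pvA_ret (prj_list : List (List String)) (h : ∀ row ∈ prj_list, row.length = 4) :
    (Chk_Duplicated_Prj prj_list).1 = true ↔ ¬ (prj_list.map pvNm).Nodup := by
  unfold Chk_Duplicated_Prj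
  set d := prj_list.foldl pvChkStep PySem.Dict.empty with hd
  have hfst := pvRet_fst d d.keys (false, "Duplicated Projects \n")
  have hmain : (d.keys.foldl (fun (s : Bool × String) item =>
      if (d.getD item []).length > 1 then (true, pvDupLogEntry s.2 item (d.getD item []))
      else s) (false, "Duplicated Projects \n")).1
      = (d.keys.any fun k => decide ((d.getD k []).length > 1)) := by
    rw [hfst]; simp
  constructor
  · intro hret
    simp only [] at hret
    split_ifs at hret with hf
    · simp [hf] at hret
    · have : (d.keys.any fun k => decide ((d.getD k []).length > 1)) = true := by
        rw [← hmain]; exact (by simpa using hf)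
      rw [List.any_eq_true] at this
      obtain ⟨k, _, hk⟩ := this
      have hlen := pvChk_getD_len prj_list h PySem.Dict.empty k
      simp [PySem.Dict.getD_empty] at hlen
      rw [← hd] at hlen
      rw [List.nodup_iff_count_le_one]
      intro hnd
      have := hnd k
      simp at hk
      omega
  · intro hnd
    simp only [List.nodup_iff_count_le_one, not_forall, not_le] at hnd
    obtain ⟨k, hk⟩ := hnd
    have hlen := pvChk_getD_len prj_list h PySem.Dict.empty k
    simp [PySem.Dict.getD_empty] at hlen
    rw [← hd] at hlen
    have hmem : k ∈ d.keys := by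
      rw [hd, pvChk_mem_keys prj_list h]
      right
      rw [← List.count_pos_iff]
      omega
    have hany : (d.keys.any fun k => decide ((d.getD k []).length > 1)) = true := by
      rw [List.any_eq_true]
      exact ⟨k, hmem, by simp; omega⟩
    simp only []
    split_ifs with hf
    · exfalso
      rw [← hmain] at hany
      simp [hf] at hany
    · simpa using hf

-- ===== VERDICT (by name: the statement is the Claim_ definition above) =====
theorem Find_Prj_Ctx_spec : Claim_equal_Find_Prj_Ctx := by
  intro t prj_list _hdom hpre
  unfold Spec_Find_Prj_Ctx
  have hm := pvB_match t prj_list (PySem.Set.empty, false, none)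
  have hdup := pvB_dup t prj_list hpre (PySem.Set.empty, false, none)
  have hret := pvA_ret prj_list hpre
  simp only [Find_Prj_Ctx, Find_Prj_Ctx_alt]
  set st := prj_list.foldl
    (fun (s : PySem.Set String × Bool × Option (List (Option String))) row =>
      match row with
      | [n, de, pa, re] =>
          let dup := if PySem.Set.contains s.1 n then true else s.2.1
          let seen := PySem.Set.add s.1 n
          let m := if t = n then some [some n, some de, some pa, some re] else s.2.2
          (seen, dup, m)
      | _ => s)
    (PySem.Set.empty, false, none) with hst
  cases hv : st.2.1 with
  | true =>
    have hA : (Chk_Duplicated_Prj prj_list).1 = true := by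
      rcases hdup.mp hv with h' | h' | h'
      · exact absurd h' (by simp)
      · obtain ⟨x, _, hxs⟩ := h'
        exact absurd hxs (by simp [PySem.Set.empty])
      · exact hret.mpr h'
    simp [hA]
  | false =>
    have hnd : (prj_list.map pvNm).Nodup := by
      by_contra hnd
      have := hdup.mpr (Or.inr (Or.inr hnd))
      rw [hv] at this
      cases this
    have hA : (Chk_Duplicated_Prj prj_list).1 = false := by
      cases hval : (Chk_Duplicated_Prj prj_list).1
      · rfl
      · exact absurd (hret.mp hval) (not_not_intro hnd)
    simp only [hA, Bool.false_eq_true, if_false]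
    rw [hm]
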